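-- pv_equiv track=rewrite | github.com/alexogeny/artemis | src/artemis/id57.py | decode57
-- ===== SOURCE A (Python) =====
-- ALPHABET = "23456789ABCDEFGHJKLMNPQRSTUVWXYZabcdefghijkmnopqrstuvwxyz"
--
-- _BASE = len(ALPHABET)
--
-- def decode57(value: str) -> int:
--     """Decode a base57 string back into an integer."""
--
--     number = 0
--     for char in value:
--         try:
--             digit = ALPHABET.index(char)
--         except ValueError as exc:  # pragma: no cover - defensive branch
--             raise ValueError(f"Character {char!r} is not valid for id57") from exc
--         number = number * _BASE + digit
--     return number
-- ===== SOURCE B (Python) =====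
-- ALPHABET = "23456789ABCDEFGHJKLMNPQRSTUVWXYZabcdefghijkmnopqrstuvwxyz"
--
-- _BASE = len(ALPHABET)
--
-- def decode57(value: str) -> int:
--     """Decode a base57 string back into an integer."""
--
--     total = 0
--     power = 1
--     for char in reversed(value):
--         try:
--             digit = ALPHABET.index(char)
--         except ValueError as exc:
--             raise ValueError(f"Character {char!r} is not valid for id57") from exc
--         total += digit * power
--         power *= _BASE
--     return total
-- ===== Notes on version B (the rewrite author's own statement) =====
-- stated objective: alternative
-- what changed: B sums explicit positional weights digit * power over the reversed string with a running power of 57, instead of A's Horner accumulator number = number*57 + digit over the string left to right.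
import Mathlib
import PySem

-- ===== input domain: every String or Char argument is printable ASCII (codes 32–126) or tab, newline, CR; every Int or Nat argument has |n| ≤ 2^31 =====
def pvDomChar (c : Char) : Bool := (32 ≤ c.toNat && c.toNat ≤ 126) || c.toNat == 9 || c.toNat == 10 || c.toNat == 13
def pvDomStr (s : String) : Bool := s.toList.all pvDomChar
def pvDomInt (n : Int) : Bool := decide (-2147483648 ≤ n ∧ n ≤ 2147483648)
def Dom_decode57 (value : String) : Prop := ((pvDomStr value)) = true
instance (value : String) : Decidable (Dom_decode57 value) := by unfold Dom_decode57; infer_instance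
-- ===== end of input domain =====

-- B replaces A's Horner accumulator by an explicit sum of positional weights digit * 57^i over the reversed string (alternative decomposition, same cost).

-- shared module context: ALPHABET and _BASE = 57
def pvAlph : List Char := "23456789ABCDEFGHJKLMNPQRSTUVWXYZabcdefghijkmnopqrstuvwxyz".toList

-- ALPHABET.index(char); Pre_ excludes the invalid-character case where Python raises ValueError
def pvDigit (c : Char) : Int := ((PySem.List.index? pvAlph c).getD 0 : Nat)

-- ===== PORT A =====
def decode57 (value : String) : Int :=
  value.toList.foldl (fun number char => number * 57 + pvDigit char) 0

-- ===== PORT B =====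
def decode57_alt (value : String) : Int :=
  (value.toList.reverse.foldl
    (fun (tp : Int × Int) char => (tp.1 + pvDigit char * tp.2, tp.2 * 57)) (0, 1)).1

-- ===== PRECONDITION & SPEC =====
-- Pre_ excludes exactly the strings containing a character outside ALPHABET, on which Python A raises ValueError.
def Pre_decode57 (value : String) : Prop := value.toList.all (fun c => pvAlph.contains c) = true
instance (value : String) : Decidable (Pre_decode57 value) := by unfold Pre_decode57; infer_instance
def pvWitness_decode57 : String := "Az9"
def Spec_decode57 (value : String) (out : Int) : Prop := out = decode57_alt value
instance (value : String) (out : Int) : Decidable (Spec_decode57 value out) := by unfold Spec_decode57; infer_instance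

-- ===== CLAIM (what is proved, stated in full; the proofs are below) =====
def Claim_equal_decode57 : Prop := ∀ (value : String), Dom_decode57 value → Pre_decode57 value → Spec_decode57 value (decode57 value)

-- ===== LEMMAS AND PROOFS =====

theorem pv_horner_acc (l : List Char) (a : Int) :
    l.foldl (fun number char => number * 57 + pvDigit char) a
      = a * 57 ^ l.length + l.foldl (fun number char => number * 57 + pvDigit char) 0 := by
  induction l generalizing a with
  | nil => simp
  | cons c l ih =>
    simp only [List.foldl_cons, List.length_cons]
    rw [ih (a * 57 + pvDigit c), ih (0 * 57 + pvDigit c)]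
    ring

theorem pv_alt_shift (r : List Char) (t p : Int) :
    r.foldl (fun (tp : Int × Int) char => (tp.1 + pvDigit char * tp.2, tp.2 * 57)) (t, p)
      = (t + p * (r.foldl (fun (tp : Int × Int) char => (tp.1 + pvDigit char * tp.2, tp.2 * 57)) (0, 1)).1,
         p * (r.foldl (fun (tp : Int × Int) char => (tp.1 + pvDigit char * tp.2, tp.2 * 57)) (0, 1)).2) := by
  induction r generalizing t p with
  | nil => simp
  | cons c r ih =>
    simp only [List.foldl_cons]
    rw [ih (t + pvDigit c * p) (p * 57), ih (0 + pvDigit c * 1) (1 * 57)]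
    refine Prod.ext ?_ ?_ <;> simp <;> ring

theorem pv_alt_pow (r : List Char) :
    (r.foldl (fun (tp : Int × Int) char => (tp.1 + pvDigit char * tp.2, tp.2 * 57)) (0, 1)).2
      = 57 ^ r.length := by
  induction r with
  | nil => simp
  | cons c r ih =>
    simp only [List.foldl_cons]
    rw [pv_alt_shift, List.length_cons]
    simp [ih]; ring

theorem pv_horner_eq_alt (l : List Char) :
    l.foldl (fun number char => number * 57 + pvDigit char) 0
      = (l.reverse.foldl (fun (tp : Int × Int) char => (tp.1 + pvDigit char * tp.2, tp.2 * 57)) (0, 1)).1 := by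
  induction l with
  | nil => simp
  | cons c l ih =>
    simp only [List.foldl_cons, List.reverse_cons, List.foldl_append]
    rw [pv_horner_acc, ← ih, pv_alt_pow, List.length_reverse]
    simp; ring

-- ===== VERDICT (by name: the statement is the Claim_ definition above) =====
theorem decode57_spec : Claim_equal_decode57 := by
  intro value _ _
  unfold Spec_decode57 decode57 decode57_alt
  exact pv_horner_eq_alt value.toList
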